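-- pv_equiv track=rewrite | github.com/chlendyd7/Algorithm | TODO/practice_1/문자열 폭발.py | solution
-- ===== SOURCE A (Python) =====
-- def solution(string, boom):
--     result_lst = []
--     boom_len = len(boom)
--
--     for s in string:
--         result_lst.append(s)
--         if ''.join(result_lst[-boom_len:]) == boom:
--             del result_lst[-boom_len:]
--     result = ''.join(result_lst)
--     if result:
--         return result
--     else:
--         return 'FRULA'
-- ===== SOURCE B (Python) =====
-- def solution(string, boom):
--     # Repeated leftmost removal instead of a character stack.
--     if boom:
--         while True:
--             i = string.find(boom)
--             if i < 0:
--                 break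
--             string = string[:i] + string[i + len(boom):]
--     return string if string else 'FRULA'
-- ===== Notes on version B (the rewrite author's own statement) =====
-- stated objective: idiomatic
-- what changed: Replaced the explicit character stack (append each char, join and compare the last len(boom) chars, delete on match) with a repeated leftmost-occurrence removal loop using str.find and slice splicing until no occurrence of boom remains; no stack is maintained.
import Mathlib
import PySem

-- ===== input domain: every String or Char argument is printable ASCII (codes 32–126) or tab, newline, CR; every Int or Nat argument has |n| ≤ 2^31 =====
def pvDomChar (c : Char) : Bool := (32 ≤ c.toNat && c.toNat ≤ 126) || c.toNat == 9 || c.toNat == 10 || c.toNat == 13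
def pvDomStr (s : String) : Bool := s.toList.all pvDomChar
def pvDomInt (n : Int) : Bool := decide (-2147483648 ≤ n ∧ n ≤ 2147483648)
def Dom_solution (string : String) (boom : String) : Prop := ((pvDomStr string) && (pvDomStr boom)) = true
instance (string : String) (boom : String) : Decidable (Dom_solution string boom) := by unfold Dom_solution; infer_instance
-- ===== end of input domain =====

-- B replaces A's character stack by a repeated leftmost-removal loop (idiomatic; measurably faster in a timing run).

-- ===== PORT A =====
-- one iteration of A's for-loop: append the char, then pop the last boom_len chars if they equal boom
def solutionStep (boom : String) (acc : List Char) (c : Char) : List Char :=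
  let acc' := acc ++ [c]
  if String.ofList (PySem.List.slice acc' (some (-(boom.toList.length : Int))) none) = boom
  then PySem.List.slice acc' none (some (-(boom.toList.length : Int)))
  else acc'

def solution (string : String) (boom : String) : String :=
  let result := String.ofList (string.toList.foldl (solutionStep boom) [])
  if result ≠ "" then result else "FRULA"

-- ===== PORT B =====
-- Source B's while-loop: remove the leftmost occurrence of boom until none is left (boom ≠ [] guarantees termination)
def solutionAltLoop (boom : List Char) (hb : boom ≠ []) (s : List Char) : List Char :=
  let i := PySem.Chars.find s boom
  if hi : 0 ≤ i then
    solutionAltLoop boom hb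
      (PySem.List.slice s none (some i) ++ PySem.List.slice s (some (i + (boom.length : Int))) none)
  else s
termination_by s.length
decreasing_by
  have hspec := PySem.Chars.find_spec (s := s) (sub := boom) hi
  have hlen : boom.length ≤ s.length - (PySem.Chars.find s boom).toNat := by
    have := hspec.1.length_le
    simpa using this
  have hm : 0 < boom.length := List.length_pos_iff.mpr hb
  have hfl : PySem.Chars.find s boom ≤ (s.length : Int) := PySem.Chars.find_le_length s boom
  have e1 : PySem.List.slice s none (some (PySem.Chars.find s boom)) = s.take (PySem.Chars.find s boom).toNat :=
    PySem.List.slice_to s hi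
  have e2 : PySem.List.slice s (some (PySem.Chars.find s boom + (boom.length : Int))) none
      = s.drop (PySem.Chars.find s boom + (boom.length : Int)).toNat :=
    PySem.List.slice_from s (by omega)
  rw [e1, e2]
  have h1 : (PySem.Chars.find s boom + (boom.length:Int)).toNat
      = (PySem.Chars.find s boom).toNat + boom.length := by omega
  rw [h1]
  simp only [List.length_append, List.length_take, List.length_drop]
  omega

def solution_alt (string : String) (boom : String) : String :=
  let s := if hb : boom.toList ≠ [] then String.ofList (solutionAltLoop boom.toList hb string.toList) else string
  if s ≠ "" then s else "FRULA"

-- ===== PRECONDITION & SPEC =====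
def Spec_solution (string : String) (boom : String) (out : String) : Prop := out = solution_alt string boom
instance (string : String) (boom : String) (out : String) : Decidable (Spec_solution string boom out) := by unfold Spec_solution; infer_instance

-- ===== CLAIM (what is proved, stated in full; the proofs are below) =====
def Claim_equal_solution : Prop := ∀ (string : String) (boom : String), Dom_solution string boom → Spec_solution string boom (solution string boom)

-- ===== LEMMAS AND PROOFS =====

theorem ofList_eq_iff (l : List Char) (b : String) : String.ofList l = b ↔ l = b.toList := by
  constructor
  · intro h; rw [← h]; simp
  · intro h; rw [h]; simp

-- the pop condition in A's step is exactly "boom is a suffix of the stack"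
theorem step_cond (boom : String) (hB : boom.toList ≠ []) (acc' : List Char) :
    (String.ofList (PySem.List.slice acc' (some (-(boom.toList.length : Int))) none) = boom)
      ↔ boom.toList <:+ acc' := by
  rw [ofList_eq_iff,
    PySem.List.slice_from_neg_natCast acc' boom.toList.length (List.length_pos_iff.mpr hB),
    eq_comm, ← List.suffix_iff_eq_drop]

-- step with empty boom never pops
theorem step_empty (boom : String) (hB : boom.toList = []) (acc : List Char) (c : Char) :
    solutionStep boom acc c = acc ++ [c] := by
  have hb0 : boom = "" := by
    have := congrArg String.ofList hB
    simpa using this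
  unfold solutionStep
  rw [hB]
  simp only [List.length_nil, Nat.cast_zero, neg_zero, PySem.List.slice_zero_start,
    PySem.List.slice_none_none]
  rw [if_neg]
  rw [ofList_eq_iff, hb0]
  simp

-- step without a boom-suffix: plain append
theorem step_nopop (boom : String) (acc : List Char) (c : Char)
    (h : ¬ boom.toList <:+ (acc ++ [c])) :
    solutionStep boom acc c = acc ++ [c] := by
  by_cases hB : boom.toList = []
  · exact step_empty boom hB acc c
  · unfold solutionStep
    rw [if_neg]
    rw [step_cond boom hB]
    exact h

-- step with a boom-suffix: pop it
theorem step_pop (boom : String) (hB : boom.toList ≠ []) (acc : List Char) (c : Char)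
    (h : boom.toList <:+ (acc ++ [c])) :
    solutionStep boom acc c = (acc ++ [c]).take ((acc ++ [c]).length - boom.toList.length) := by
  unfold solutionStep
  rw [if_pos ((step_cond boom hB (acc ++ [c])).mpr h)]
  exact PySem.List.slice_to_neg_natCast (acc ++ [c]) boom.toList.length
    (List.length_pos_iff.mpr hB)

-- no pop occurs while scanning a prefix inside which no occurrence of boom ends
theorem foldl_take_nopop (boom : String) (s : List Char) (n : Nat) (hn : n ≤ s.length)
    (h : ∀ j, boom.toList <+: s.drop j → n < j + boom.toList.length) :
    (s.take n).foldl (solutionStep boom) [] = s.take n := by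
  induction n with
  | zero => simp
  | succ n IH =>
    have hn' : n < s.length := by omega
    have hgn : s[n]? = some (s[n]'hn') := List.getElem?_eq_getElem hn'
    rw [List.take_succ, hgn]
    simp only [Option.toList_some, List.foldl_append, List.foldl_cons, List.foldl_nil]
    rw [IH (by omega) (fun j hj => by have := h j hj; omega)]
    apply step_nopop
    intro hsuf
    have hlt : (List.take n s ++ [s[n]'hn']).length = n + 1 := by
      simp [List.length_take]
      omega
    have hmle : boom.toList.length ≤ n + 1 := by
      have hl := hsuf.length_le
      rw [hlt] at hl
      exact hl
    -- the suffix is an occurrence of boom ending at position n + 1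
    have hdrop : boom.toList <+: s.drop (n + 1 - boom.toList.length) := by
      have heq : boom.toList
          = (List.take n s ++ [s[n]'hn']).drop (n + 1 - boom.toList.length) :=
        (List.suffix_iff_eq_drop.mp hsuf).trans (by rw [hlt])
      have hsplit : List.take n s ++ [s[n]'hn'] = s.take (n + 1) := by
        rw [List.take_succ, hgn]; simp
      have : s.drop (n + 1 - boom.toList.length)
          = (List.take n s ++ [s[n]'hn']).drop (n + 1 - boom.toList.length) ++ s.drop (n + 1) := by
        conv_lhs => rw [← List.take_append_drop (n + 1) s]
        rw [← hsplit, List.drop_append, hlt,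
          show n + 1 - boom.toList.length - (n + 1) = 0 from by omega, List.drop_zero]
      rw [this, ← heq]
      exact List.prefix_append _ _
    have := h _ hdrop
    omega

-- removing the leftmost occurrence of boom commutes with A's scan
theorem foldl_remove_leftmost (boom : String) (hB : boom.toList ≠ []) (s : List Char) (i : Nat)
    (hocc : boom.toList <+: s.drop i) (hmin : ∀ j < i, ¬ boom.toList <+: s.drop j) :
    s.foldl (solutionStep boom) [] =
      (s.take i ++ s.drop (i + boom.toList.length)).foldl (solutionStep boom) [] := by
  set m := boom.toList.length with hm
  have hm1 : 0 < m := List.length_pos_iff.mpr hB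
  have hilen : i + m ≤ s.length := by
    have h1 := hocc.length_le
    have h2 : (s.drop i).length = s.length - i := by simp
    by_cases hi : i ≤ s.length
    · omega
    · exfalso
      have : s.drop i = [] := by
        apply List.drop_eq_nil_of_le; omega
      rw [this] at hocc
      have := hocc.length_le
      simp at this
      omega
  -- occurrences of boom are at positions ≥ i
  have hge : ∀ j, boom.toList <+: s.drop j → i ≤ j := by
    intro j hj
    by_contra hlt
    exact hmin j (by omega) hj
  -- the first i+m characters scan to s.take i
  have hfirst : (s.take (i + m)).foldl (solutionStep boom) [] = s.take i := by
    have hn' : i + m - 1 < s.length := by omega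
    have hgn : s[i + m - 1]? = some (s[i + m - 1]'hn') := List.getElem?_eq_getElem hn'
    have hsucc : i + m = (i + m - 1) + 1 := by omega
    rw [hsucc, List.take_succ, hgn]
    simp only [Option.toList_some, List.foldl_append, List.foldl_cons, List.foldl_nil]
    rw [foldl_take_nopop boom s (i + m - 1) (by omega)
      (fun j hj => by have := hge j hj; omega)]
    have hsplit : s.take (i + m - 1) ++ [s[i + m - 1]'hn'] = s.take (i + m) := by
      conv_rhs => rw [hsucc]
      rw [List.take_succ, hgn]; simp
    obtain ⟨t, ht⟩ := hocc
    have htake : s.take (i + m) = s.take i ++ boom.toList := by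
      rw [List.take_add, ← ht, List.take_left' hm.symm]
    have hsuf : boom.toList <:+ (s.take (i + m - 1) ++ [s[i + m - 1]'hn']) := by
      rw [hsplit, htake]; exact List.suffix_append _ _
    rw [step_pop boom hB _ _ hsuf, hsplit, htake]
    have hli : (s.take i).length = i := by rw [List.length_take]; omega
    rw [show (s.take i ++ boom.toList).length - boom.toList.length = i from by
      rw [List.length_append, hli]; omega]
    rw [List.take_left' hli]
  calc s.foldl (solutionStep boom) []
      = (s.take (i + m) ++ s.drop (i + m)).foldl (solutionStep boom) [] := by
        rw [List.take_append_drop]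
    _ = (s.drop (i + m)).foldl (solutionStep boom) ((s.take (i + m)).foldl (solutionStep boom) []) := by
        rw [List.foldl_append]
    _ = (s.drop (i + m)).foldl (solutionStep boom) (s.take i) := by rw [hfirst]
    _ = (s.take i ++ s.drop (i + m)).foldl (solutionStep boom) [] := by
        rw [List.foldl_append,
          foldl_take_nopop boom s i (by omega) (fun j hj => by have := hge j hj; omega)]

-- A's scan equals B's removal loop (boom nonempty)
theorem foldl_eq_loop (boom : String) (hB : boom.toList ≠ []) (s : List Char) :
    s.foldl (solutionStep boom) [] = solutionAltLoop boom.toList hB s := by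
  generalize hN : s.length = N
  induction N using Nat.strong_induction_on generalizing s with
  | _ N IH =>
    rw [solutionAltLoop]
    by_cases hi : 0 ≤ PySem.Chars.find s boom.toList
    · rw [dif_pos hi]
      have hspec := PySem.Chars.find_spec (s := s) (sub := boom.toList) hi
      set iN := (PySem.Chars.find s boom.toList).toNat with hiN
      have hfl := PySem.Chars.find_le_length s boom.toList
      have hmlen : boom.toList.length ≤ s.length - iN := by
        have := hspec.1.length_le
        simpa using this
      have hm1 : 0 < boom.toList.length := List.length_pos_iff.mpr hB
      have e1 : PySem.List.slice s none (some (PySem.Chars.find s boom.toList)) = s.take iN :=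
        PySem.List.slice_to s hi
      have e2 : PySem.List.slice s (some (PySem.Chars.find s boom.toList + (boom.toList.length : Int))) none
          = s.drop (iN + boom.toList.length) := by
        rw [PySem.List.slice_from s (by omega)]
        congr 1
        omega
      rw [e1, e2]
      rw [foldl_remove_leftmost boom hB s iN hspec.1 hspec.2]
      refine IH _ ?_ _ rfl
      simp only [List.length_append, List.length_take, List.length_drop]
      omega
    · rw [dif_neg hi]
      have hninf : ¬ boom.toList <:+: s := by
        rw [← PySem.Chars.find_nonneg_iff]
        exact hi
      have := foldl_take_nopop boom s s.length le_rfl (fun j hj => by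
        exact absurd (hj.isInfix.trans (List.drop_suffix j s).isInfix) hninf)
      simpa using this

-- with empty boom A's scan copies the string unchanged
theorem foldl_empty (boom : String) (hB : boom.toList = []) (s acc : List Char) :
    s.foldl (solutionStep boom) acc = acc ++ s := by
  induction s generalizing acc with
  | nil => simp
  | cons c t IH =>
    simp only [List.foldl_cons]
    rw [step_empty boom hB acc c, IH]
    simp

-- ===== VERDICT (by name: the statement is the Claim_ definition above) =====
theorem solution_spec : Claim_equal_solution := by
  intro string boom _
  unfold Spec_solution solution solution_alt
  by_cases hb : boom.toList = []
  · rw [dif_neg (by simpa using hb)]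
    rw [foldl_empty boom hb string.toList []]
    simp
  · rw [dif_pos hb]
    rw [foldl_eq_loop boom hb string.toList]
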